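-- pv_equiv track=rewrite | github.com/Shrinivas-git/AI-Driven-Speech-Clarity-Enhancement-System | backend/compare_transcription_accuracy.py | count_disfluencies
-- ===== SOURCE A (Python) =====
-- def count_disfluencies(text: str) -> dict:
--     """Count disfluencies in transcribed text."""
--     text_lower = text.lower()
--
--     # Common disfluencies
--     fillers = ["uh", "um", "er", "ah", "hmm", "like", "you know"]
--     repetitions = 0
--     filler_count = 0
--
--     words = text_lower.split()
--
--     # Count fillers
--     for filler in fillers:
--         filler_count += words.count(filler)
--
--     # Count repetitions (consecutive same words)
--     for i in range(len(words) - 1):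
--         if words[i] == words[i + 1]:
--             repetitions += 1
--
--     return {
--         "fillers": filler_count,
--         "repetitions": repetitions,
--         "total_words": len(words)
--     }
-- ===== SOURCE B (Python) =====
-- FILLERS = frozenset(["uh", "um", "er", "ah", "hmm", "like", "you know"])
--
-- def count_disfluencies(text: str) -> dict:
--     """Count disfluencies in transcribed text (single fused pass)."""
--     words = text.lower().split()
--     filler_count = 0
--     repetitions = 0
--     prev = None
--     for w in words:
--         if w in FILLERS:
--             filler_count += 1
--         if w == prev:
--             repetitions += 1
--         prev = w
--     return {
--         "fillers": filler_count,
--         "repetitions": repetitions,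
--         "total_words": len(words)
--     }
-- ===== Notes on version B (the rewrite author's own statement) =====
-- stated objective: simpler
-- what changed: Replaced the seven whole-list .count scans plus a separate index-based adjacency loop with one fused pass over the words that tracks the previous word and tests frozenset membership.
import Mathlib
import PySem

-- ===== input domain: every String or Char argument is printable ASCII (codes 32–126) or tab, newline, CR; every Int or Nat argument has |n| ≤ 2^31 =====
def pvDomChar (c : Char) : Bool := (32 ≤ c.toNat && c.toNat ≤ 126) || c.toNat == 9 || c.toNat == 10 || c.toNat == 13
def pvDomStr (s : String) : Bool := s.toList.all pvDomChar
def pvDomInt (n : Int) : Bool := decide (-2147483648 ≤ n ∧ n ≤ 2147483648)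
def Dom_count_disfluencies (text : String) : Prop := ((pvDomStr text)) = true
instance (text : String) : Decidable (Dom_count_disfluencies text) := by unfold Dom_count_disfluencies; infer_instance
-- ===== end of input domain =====

-- B fuses A's seven whole-list .count scans and its separate index-based adjacency
-- loop into one pass over the words with a set membership test and a tracked previous word (objective: simpler).

-- ===== PORT A =====
def pvFillersA : List String := ["uh", "um", "er", "ah", "hmm", "like", "you know"]

def count_disfluencies (text : String) : List (String × Int) :=
  let text_lower := PySem.Str.lower text
  let words := PySem.Str.split₀ text_lower
  let filler_count : Int :=
    pvFillersA.foldl (fun acc filler => acc + (PySem.List.count words filler : Int)) 0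
  let repetitions : Int :=
    (PySem.List.pyRange 0 ((words.length : Int) - 1) 1).foldl
      (fun acc i => if PySem.List.pyGet? words i = PySem.List.pyGet? words (i + 1) then acc + 1 else acc) 0
  [("fillers", filler_count), ("repetitions", repetitions), ("total_words", (words.length : Int))]

-- ===== PORT B =====
def pvFillerSet : PySem.Set String := PySem.Set.ofList ["uh", "um", "er", "ah", "hmm", "like", "you know"]

def count_disfluencies_alt (text : String) : List (String × Int) :=
  let words := PySem.Str.split₀ (PySem.Str.lower text)
  let s := words.foldl
      (fun (s : Int × Int × Option String) w =>
        (s.1 + (if PySem.Set.contains pvFillerSet w then 1 else 0),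
         s.2.1 + (if some w = s.2.2 then 1 else 0),
         some w))
      ((0 : Int), (0 : Int), (none : Option String))
  [("fillers", s.1), ("repetitions", s.2.1), ("total_words", (words.length : Int))]

-- ===== PRECONDITION & SPEC =====
def Spec_count_disfluencies (text : String) (out : List (String × Int)) : Prop := out = count_disfluencies_alt text
instance (text : String) (out : List (String × Int)) : Decidable (Spec_count_disfluencies text out) := by unfold Spec_count_disfluencies; infer_instance

-- ===== CLAIM (what is proved, stated in full; the proofs are below) =====
def Claim_equal_count_disfluencies : Prop := ∀ (text : String), Dom_count_disfluencies text → Spec_count_disfluencies text (count_disfluencies text)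

-- ===== LEMMAS AND PROOFS =====

/-- number of equal consecutive pairs -/
def pvAdj : List String → Int
  | [] => 0
  | [_] => 0
  | a :: b :: t => (if a = b then 1 else 0) + pvAdj (b :: t)

/-- B's repetition count starting from a given previous word -/
def pvRep (prev : Option String) : List String → Int
  | [] => 0
  | w :: t => (if some w = prev then 1 else 0) + pvRep (some w) t

def pvLast (prev : Option String) : List String → Option String
  | [] => prev
  | w :: t => pvLast (some w) t

lemma pvFillerSet_eq : pvFillerSet = ["uh", "um", "er", "ah", "hmm", "like", "you know"] := by decide

lemma pvAlt_fold (ws : List String) :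
    ∀ (fc r : Int) (prev : Option String),
      ws.foldl
        (fun (s : Int × Int × Option String) w =>
          (s.1 + (if PySem.Set.contains pvFillerSet w then 1 else 0),
           s.2.1 + (if some w = s.2.2 then 1 else 0),
           some w)) (fc, r, prev)
      = (fc + (ws.countP (fun w => PySem.Set.contains pvFillerSet w) : Int),
         r + pvRep prev ws, pvLast prev ws) := by
  induction ws with
  | nil => intro fc r prev; simp [pvRep, pvLast]
  | cons a t ih =>
      intro fc r prev
      simp only [List.foldl_cons, ih, pvRep, pvLast, List.countP_cons, Prod.mk.injEq]
      exact ⟨by push_cast; ring, by ring, trivial⟩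

lemma pvIndicator (a : String) :
    (pvFillersA.map (fun f => ((if a == f then 1 else 0 : Nat) : Int))).sum
      = (if PySem.Set.contains pvFillerSet a then 1 else 0 : Int) := by
  simp [pvFillersA, pvFillerSet_eq]
  split_ifs <;> simp_all

lemma pvFillers_sum (ws : List String) :
    (pvFillersA.map (fun f => (PySem.List.count ws f : Int))).sum
      = (ws.countP (fun w => PySem.Set.contains pvFillerSet w) : Int) := by
  induction ws with
  | nil => simp [pvFillersA, PySem.List.count]
  | cons a t ih =>
      have h : (pvFillersA.map (fun f => (PySem.List.count (a :: t) f : Int)))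
          = pvFillersA.map (fun f => (PySem.List.count t f : Int) + ((if a == f then 1 else 0 : Nat) : Int)) := by
        apply List.map_congr_left
        intro f _
        simp [PySem.List.count, List.count_cons]
      rw [h, PySem.List.sum_map_add_int, ih, pvIndicator, List.countP_cons]
      push_cast; ring

lemma pvAdj_countP (ws : List String) :
    ((List.range (ws.length - 1)).countP (fun k => decide (ws[k]? = ws[k + 1]?)) : Int) = pvAdj ws := by
  induction ws with
  | nil => simp [pvAdj]
  | cons a t ih =>
      cases t with
      | nil => simp [pvAdj]
      | cons b t' =>
          rw [show (a :: b :: t').length - 1 = (b :: t').length - 1 + 1 by simp,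
              List.range_succ_eq_map]
          simp only [List.countP_cons, List.countP_map]
          have h : ∀ k : Nat,
              ((fun k => decide ((a :: b :: t')[k]? = (a :: b :: t')[k + 1]?)) ∘ (· + 1)) k
                = (fun k => decide ((b :: t')[k]? = (b :: t')[k + 1]?)) k := by
            intro k; simp
          rw [List.countP_congr (fun k _ => by rw [h k])]
          simp only [pvAdj]
          rw [← ih]
          have hab : (decide ((a :: b :: t')[0]? = (a :: b :: t')[0 + 1]?) = true) ↔ a = b := by simp
          by_cases hcond : a = b <;> simp [hcond] at hab ⊢ <;> omega

lemma pvRep_adj (ws : List String) :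
    ∀ prev : Option String,
      pvRep prev ws
        = (match ws with | [] => 0 | w :: _ => if some w = prev then 1 else 0) + pvAdj ws := by
  induction ws with
  | nil => intro prev; simp [pvRep, pvAdj]
  | cons a t ih =>
      intro prev
      cases t with
      | nil => simp [pvRep, pvAdj]
      | cons b t' =>
          rw [show pvRep prev (a :: b :: t')
                = (if some a = prev then 1 else 0) + pvRep (some a) (b :: t') from rfl,
              ih (some a)]
          by_cases h : a = b <;> simp [pvAdj, h, eq_comm]

lemma pvRangeFold_adj (ws : List String) :
    (PySem.List.pyRange 0 ((ws.length : Int) - 1) 1).foldl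
        (fun acc i => if PySem.List.pyGet? ws i = PySem.List.pyGet? ws (i + 1) then acc + 1 else acc) 0
      = pvAdj ws := by
  rw [PySem.List.foldl_ite_add_one]
  rw [PySem.List.pyRange_one]
  rw [List.countP_map]
  have h : ∀ k : Nat,
      ((fun i => decide (PySem.List.pyGet? ws i = PySem.List.pyGet? ws (i + 1))) ∘ (fun k : Nat => (0 : Int) + k)) k
        = (fun k => decide (ws[k]? = ws[k + 1]?)) k := by
    intro k
    have h2 : (0 : Int) + (k : Int) + 1 = ((k + 1 : Nat) : Int) := by push_cast; ring
    have h1 : (0 : Int) + (k : Int) = ((k : Nat) : Int) := by ring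
    simp only [Function.comp_apply]
    rw [h2, h1, PySem.List.pyGet?_natCast, PySem.List.pyGet?_natCast]
  rw [List.countP_congr (fun k _ => by rw [h k])]
  have hlen : (((ws.length : Int) - 1 - 0)).toNat = ws.length - 1 := by omega
  rw [hlen, zero_add, pvAdj_countP]

-- ===== VERDICT (by name: the statement is the Claim_ definition above) =====
theorem count_disfluencies_spec : Claim_equal_count_disfluencies := by
  intro text _
  unfold Spec_count_disfluencies
  simp only [count_disfluencies, count_disfluencies_alt]
  generalize PySem.Str.split₀ (PySem.Str.lower text) = ws
  rw [pvAlt_fold ws 0 0 none, PySem.List.foldl_add, pvFillers_sum, pvRangeFold_adj,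
      pvRep_adj ws none]
  cases ws <;> simp
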